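-- pv_equiv track=rewrite | github.com/ShakuriAvi/LeetCode | canTransform_medium.py | canTransform
-- ===== SOURCE A (Python) =====
-- def canTransform(start: str, end: str) -> bool:
--     queue = [start]
--     visited = set()
--     while queue:
--         node = queue.pop(0)
--         if node == end:
--             return True
--         if node in visited:
--             continue
--
--         for i in range(len(node)):
--             if i+1 < len(node):
--                 curr_string = node[i] + node[i + 1]
--                 if curr_string == "XL":
--                     queue.append(node[:i] + "LX" + node[i+2:])
--                     visited.add(node)
--                 elif curr_string == "RX":
--                     queue.append(node[:i]+"XR"+node[i+2:])
--                     visited.add(node)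
--     return False
-- ===== SOURCE B (Python) =====
-- def canTransform(start: str, end: str) -> bool:
--     # O(n) check: deleting the 'X's must leave identical strings, and the k-th
--     # non-'X' character may only move left if it is 'L', only right if it is
--     # 'R', and not at all otherwise.
--     if len(start) != len(end):
--         return False
--     if start.replace('X', '') != end.replace('X', ''):
--         return False
--     a = [(i, c) for i, c in enumerate(start) if c != 'X']
--     b = [(j, d) for j, d in enumerate(end) if d != 'X']
--     for (i, c), (j, _) in zip(a, b):
--         if c == 'L':
--             if i < j:
--                 return False
--         elif c == 'R':
--             if i > j:
--                 return False
--         elif i != j: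
--             return False
--     return True
-- ===== Notes on version B (the rewrite author's own statement) =====
-- stated objective: faster
-- what changed: Replaced the brute-force BFS over all move-reachable strings by a linear scan comparing the enumerated non-'X' characters of the two strings (same order, each 'L' may only move left, each 'R' only right, other characters fixed).
import Mathlib
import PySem

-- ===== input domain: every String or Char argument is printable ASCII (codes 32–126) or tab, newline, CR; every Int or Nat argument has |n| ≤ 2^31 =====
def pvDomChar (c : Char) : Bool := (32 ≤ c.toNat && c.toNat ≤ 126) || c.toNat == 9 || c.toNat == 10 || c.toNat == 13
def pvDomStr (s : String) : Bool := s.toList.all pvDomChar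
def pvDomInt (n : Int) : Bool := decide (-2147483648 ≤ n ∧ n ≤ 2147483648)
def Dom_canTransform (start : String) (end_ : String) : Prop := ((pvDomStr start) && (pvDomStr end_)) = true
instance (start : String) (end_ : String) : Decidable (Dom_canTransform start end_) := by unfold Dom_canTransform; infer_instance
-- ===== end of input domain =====

-- B is a linear scan over the non-'X' characters; A is the original BFS over all
-- move-reachable strings (ported with a fuel bound that provably suffices).

-- ===== PORT A =====
-- one iteration of A's inner 'for i in range(len(node))' loop body, acting on (queue, visited)
def pvLoopBody (node : List Char) (qv : List (List Char) × PySem.Set (List Char)) (i : Int) :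
    List (List Char) × PySem.Set (List Char) :=
  if i + 1 < (node.length : Int) then
    match PySem.List.pyGet? node i, PySem.List.pyGet? node (i + 1) with
    | some c0, some c1 =>
      if c0 = 'X' ∧ c1 = 'L' then
        (qv.1 ++ [PySem.List.slice node none (some i) ++ 'L' :: 'X' :: PySem.List.slice node (some (i + 2)) none],
         PySem.Set.add qv.2 node)
      else if c0 = 'R' ∧ c1 = 'X' then
        (qv.1 ++ [PySem.List.slice node none (some i) ++ 'X' :: 'R' :: PySem.List.slice node (some (i + 2)) none],
         PySem.Set.add qv.2 node)
      else qv
    | _, _ => qv  -- unreachable: guarded by i+1 < len(node)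
  else qv

-- A's 'while queue' loop; fuel only makes the recursion structural (proved sufficient below)
def pvBFS (endL : List Char) : Nat → List (List Char) → PySem.Set (List Char) → Bool
  | 0, _, _ => false
  | _ + 1, [], _ => false
  | fuel + 1, node :: rest, visited =>
    if node = endL then true
    else if PySem.Set.contains visited node then pvBFS endL fuel rest visited
    else
      let qv := (PySem.List.pyRange 0 node.length 1).foldl (pvLoopBody node) (rest, visited)
      pvBFS endL fuel qv.1 qv.2

def canTransform (start : String) (end_ : String) : Bool :=
  pvBFS end_.toList (start.toList.length * Nat.factorial start.toList.length + 1)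
    [start.toList] PySem.Set.empty

-- ===== PORT B =====
def canTransform_alt (start : String) (end_ : String) : Bool :=
  if start.toList.length ≠ end_.toList.length then false
  else if PySem.Str.replace start "X" "" ≠ PySem.Str.replace end_ "X" "" then false
  else
    let a := (PySem.List.enumerate start.toList 0).filter (fun p => p.2 ≠ 'X')
    let b := (PySem.List.enumerate end_.toList 0).filter (fun p => p.2 ≠ 'X')
    (a.zip b).all (fun pq =>
      if pq.1.2 = 'L' then decide (pq.2.1 ≤ pq.1.1)
      else if pq.1.2 = 'R' then decide (pq.1.1 ≤ pq.2.1)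
      else decide (pq.1.1 = pq.2.1))

-- ===== PRECONDITION & SPEC =====
def Spec_canTransform (start : String) (end_ : String) (out : Bool) : Prop := out = canTransform_alt start end_
instance (start : String) (end_ : String) (out : Bool) : Decidable (Spec_canTransform start end_ out) := by unfold Spec_canTransform; infer_instance

-- ===== CLAIM (what is proved, stated in full; the proofs are below) =====
def Claim_equal_canTransform : Prop := ∀ (start : String) (end_ : String), Dom_canTransform start end_ → Spec_canTransform start end_ (canTransform start end_)

-- ===== LEMMAS AND PROOFS =====

-- the elementary move relation: "XL" -> "LX", "RX" -> "XR"
inductive pvStep : List Char → List Char → Prop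
  | xl (a b : List Char) : pvStep (a ++ 'X' :: 'L' :: b) (a ++ 'L' :: 'X' :: b)
  | rx (a b : List Char) : pvStep (a ++ 'R' :: 'X' :: b) (a ++ 'X' :: 'R' :: b)

def pvReach : List Char → List Char → Prop := Relation.ReflTransGen pvStep

-- indexed non-'X' characters
def pvKey (off : Int) : List Char → List (Int × Char)
  | [] => []
  | c :: t => if c = 'X' then pvKey (off + 1) t else (off, c) :: pvKey (off + 1) t

def pvRel (p q : Int × Char) : Prop :=
  p.2 = q.2 ∧ (p.2 = 'L' → q.1 ≤ p.1) ∧ (p.2 = 'R' → p.1 ≤ q.1) ∧ (p.2 ≠ 'L' → p.2 ≠ 'R' → p.1 = q.1)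

def pvCond (s e : List Char) : Prop :=
  s.length = e.length ∧ List.Forall₂ pvRel (pvKey 0 s) (pvKey 0 e)

def pvD (s e : List Char) : Nat :=
  (List.zipWith (fun p q : Int × Char => (p.1 - q.1).natAbs) (pvKey 0 s) (pvKey 0 e)).sum


-- ---------- key (enumerated non-'X' characters) lemmas ----------

theorem pvKey_append (a b : List Char) : ∀ off : Int, pvKey off (a ++ b) = pvKey off a ++ pvKey (off + a.length) b := by
  induction a with
  | nil => intro off; simp [pvKey]
  | cons c t ih =>
    intro off
    have h : off + ((t.length : Int) + 1) = off + 1 + (t.length : Int) := by ring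
    simp only [List.cons_append, pvKey, List.length_cons]
    push_cast
    rw [h, ih (off + 1)]
    split_ifs with hc
    · rfl
    · simp [List.cons_append]

theorem pvKey_shift (t : List Char) : ∀ off : Int, pvKey off t = (pvKey 0 t).map (fun p => (p.1 + off, p.2)) := by
  induction t with
  | nil => intro off; simp [pvKey]
  | cons c u ih =>
    intro off
    simp only [pvKey]
    split_ifs with hc
    · rw [ih (off + 1), ih (0 + 1), List.map_map]
      congr 1; funext p; simp; ring
    · rw [ih (off + 1)]
      conv_rhs => rw [ih (0 + 1)]
      simp only [List.map_cons, List.map_map, List.cons.injEq]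
      refine ⟨by simp, ?_⟩
      congr 1
      funext p; simp; ring

-- positions in pvKey off u are ≥ off + (number of earlier key elements)
theorem pvKey_pos_ge (u : List Char) : ∀ (off : Int) (zs1 : List (Int × Char)) (q : Int × Char) (zs2 : List (Int × Char)),
    pvKey off u = zs1 ++ q :: zs2 → off + zs1.length ≤ q.1 := by
  induction u with
  | nil => intro off zs1 q zs2 h; simp [pvKey] at h
  | cons c t ih =>
    intro off zs1 q zs2 h
    simp only [pvKey] at h
    split_ifs at h with hc
    · have := ih (off + 1) zs1 q zs2 h; omega
    · cases zs1 with
      | nil =>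
        simp only [List.nil_append, List.cons.injEq] at h
        obtain ⟨h1, -⟩ := h
        rw [← h1]
        simp
      | cons z zs =>
        simp only [List.cons_append, List.cons.injEq] at h
        have := ih (off + 1) zs q zs2 h.2
        simp [List.length_cons]; omega

theorem pvKey_length_le (u : List Char) : ∀ off : Int, (pvKey off u).length ≤ u.length := by
  induction u with
  | nil => intro off; simp [pvKey]
  | cons c t ih =>
    intro off; simp only [pvKey]; split_ifs
    · exact le_trans (ih _) (by simp)
    · simp only [List.length_cons]; exact Nat.succ_le_succ (ih _)

theorem pvKey_length_of_noX (u : List Char) (h : 'X' ∉ u) : ∀ off : Int, (pvKey off u).length = u.length := by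
  induction u with
  | nil => intro off; simp [pvKey]
  | cons c t ih =>
    intro off
    have hc : c ≠ 'X' := fun hh => h (hh ▸ List.mem_cons_self ..)
    have ht : 'X' ∉ t := fun hh => h (List.mem_cons_of_mem _ hh)
    simp only [pvKey, if_neg hc, List.length_cons, ih ht]

theorem pvKey_replicate_X (n : Nat) : ∀ off : Int, pvKey off (List.replicate n 'X') = [] := by
  induction n with
  | zero => intro off; simp [pvKey]
  | succ m ih => intro off; simp [List.replicate_succ, pvKey, ih]

-- if the first key element of s is (i, c) then s is i copies of 'X', then c
theorem pvKey_head_decomp (s : List Char) : ∀ (off i : Int) (c : Char) (K : List (Int × Char)),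
    pvKey off s = (i, c) :: K →
    ∃ t, s = List.replicate (i - off).toNat 'X' ++ c :: t ∧ K = pvKey (i + 1) t ∧ off ≤ i := by
  induction s with
  | nil => intro off i c K h; simp [pvKey] at h
  | cons x u ih =>
    intro off i c K h
    simp only [pvKey] at h
    split_ifs at h with hx
    · obtain ⟨t, h1, h2, h3⟩ := ih (off + 1) i c K h
      refine ⟨t, ?_, h2, by omega⟩
      subst hx
      have : (i - off).toNat = (i - (off + 1)).toNat + 1 := by omega
      rw [this, List.replicate_succ, h1]
      simp [List.cons_append]
    · simp only [List.cons.injEq, Prod.mk.injEq] at h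
      obtain ⟨⟨h1, h2⟩, h3⟩ := h
      refine ⟨u, by simp [← h2, show (i - off).toNat = 0 by omega], by rw [← h3, h1], le_of_eq h1⟩

-- ---------- pvRel / Forall₂ helpers ----------

theorem pvRel_refl (p : Int × Char) : pvRel p p := by
  unfold pvRel; exact ⟨rfl, fun _ => le_refl _, fun _ => le_refl _, fun _ _ => rfl⟩

theorem forall₂_pvRel_refl (l : List (Int × Char)) : List.Forall₂ pvRel l l := by
  induction l with
  | nil => exact List.Forall₂.nil
  | cons p t ih => exact List.Forall₂.cons (pvRel_refl p) ih

-- replace one element on the left of a Forall₂ by a stronger one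
theorem forall₂_replace_at {R : Int × Char → Int × Char → Prop} (xs : List (Int × Char)) :
    ∀ (p p' : Int × Char) (ys : List (Int × Char)) (zs : List (Int × Char)),
    List.Forall₂ R (xs ++ p :: ys) zs → (∀ q, R p q → R p' q) → List.Forall₂ R (xs ++ p' :: ys) zs := by
  induction xs with
  | nil =>
    intro p p' ys zs h himp
    cases h with
    | cons hpq htail => exact List.Forall₂.cons (himp _ hpq) htail
  | cons x xt ih =>
    intro p p' ys zs h himp
    cases h with
    | cons hpq htail => exact List.Forall₂.cons hpq (ih p p' ys _ htail himp)

-- decompose a Forall₂ along an append on the left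
theorem forall₂_decomp {R : Int × Char → Int × Char → Prop} (xs : List (Int × Char)) :
    ∀ (p : Int × Char) (ys zs : List (Int × Char)),
    List.Forall₂ R (xs ++ p :: ys) zs →
    ∃ zs1 q zs2, zs = zs1 ++ q :: zs2 ∧ zs1.length = xs.length ∧ R p q := by
  induction xs with
  | nil =>
    intro p ys zs h
    cases h with
    | cons hpq htail => exact ⟨[], _, _, rfl, rfl, hpq⟩
  | cons x xt ih =>
    intro p ys zs h
    cases h with
    | @cons _ b _ l₂ hpq htail =>
      obtain ⟨zs1, q, zs2, h1, h2, h3⟩ := ih p ys l₂ htail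
      exact ⟨b :: zs1, q, zs2, by rw [h1]; simp [List.cons_append], by simp [h2], h3⟩


-- ---------- small key computations ----------

theorem pvKey_XL (b : List Char) (off : Int) : pvKey off ('X' :: 'L' :: b) = (off + 1, 'L') :: pvKey (off + 2) b := by
  have h : off + 1 + 1 = off + 2 := by ring
  simp [pvKey, h]

theorem pvKey_LX (b : List Char) (off : Int) : pvKey off ('L' :: 'X' :: b) = (off, 'L') :: pvKey (off + 2) b := by
  have h : off + 1 + 1 = off + 2 := by ring
  simp [pvKey, h]

theorem pvKey_RX (b : List Char) (off : Int) : pvKey off ('R' :: 'X' :: b) = (off, 'R') :: pvKey (off + 2) b := by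
  have h : off + 1 + 1 = off + 2 := by ring
  simp [pvKey, h]

theorem pvKey_XR (b : List Char) (off : Int) : pvKey off ('X' :: 'R' :: b) = (off + 1, 'R') :: pvKey (off + 2) b := by
  have h : off + 1 + 1 = off + 2 := by ring
  simp [pvKey, h]

-- ---------- shift invariance ----------

theorem pvRel_shift (d : Int) (p q : Int × Char) : pvRel (p.1 + d, p.2) (q.1 + d, q.2) ↔ pvRel p q := by
  unfold pvRel
  constructor
  · rintro ⟨h1, h2, h3, h4⟩
    exact ⟨h1, fun h => by have := h2 h; omega, fun h => by have := h3 h; omega,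
           fun ha hb => by have := h4 ha hb; omega⟩
  · rintro ⟨h1, h2, h3, h4⟩
    exact ⟨h1, fun h => by have := h2 h; omega, fun h => by have := h3 h; omega,
           fun ha hb => by have := h4 ha hb; omega⟩

theorem forall₂_pvRel_shift (d : Int) (k1 k2 : List (Int × Char)) :
    List.Forall₂ pvRel (k1.map (fun p => (p.1 + d, p.2))) (k2.map (fun p => (p.1 + d, p.2))) ↔
      List.Forall₂ pvRel k1 k2 := by
  rw [List.forall₂_map_left_iff, List.forall₂_map_right_iff]
  constructor
  · intro h; exact h.imp (fun {a b} hab => (pvRel_shift d a b).mp hab)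
  · intro h; exact h.imp (fun {a b} hab => (pvRel_shift d a b).mpr hab)

theorem pvCond_cons (c : Char) (u v : List Char) : pvCond (c :: u) (c :: v) ↔ pvCond u v := by
  unfold pvCond
  have hu := pvKey_shift u (0 + 1)
  have hv := pvKey_shift v (0 + 1)
  constructor
  · rintro ⟨h1, h2⟩
    refine ⟨by simpa using h1, ?_⟩
    simp only [pvKey] at h2
    split_ifs at h2 with hc
    · rw [hu, hv, forall₂_pvRel_shift] at h2; exact h2
    · cases h2 with
      | cons _ htail => rw [hu, hv, forall₂_pvRel_shift] at htail; exact htail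
  · rintro ⟨h1, h2⟩
    refine ⟨by simpa using h1, ?_⟩
    simp only [pvKey]
    split_ifs with hc
    · rw [hu, hv, forall₂_pvRel_shift]; exact h2
    · exact List.Forall₂.cons (pvRel_refl _) (by rw [hu, hv, forall₂_pvRel_shift]; exact h2)

theorem pvD_cons (c : Char) (u v : List Char) : pvD (c :: u) (c :: v) = pvD u v := by
  unfold pvD
  have hu := pvKey_shift u (0 + 1)
  have hv := pvKey_shift v (0 + 1)
  have hz : ∀ k1 k2 : List (Int × Char),
      List.zipWith (fun p q : Int × Char => (p.1 - q.1).natAbs)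
        (k1.map (fun p => (p.1 + (0 + 1), p.2))) (k2.map (fun p => (p.1 + (0 + 1), p.2))) =
      List.zipWith (fun p q : Int × Char => (p.1 - q.1).natAbs) k1 k2 := by
    intro k1 k2
    rw [List.zipWith_map]
    congr 1
    funext p q
    simp
  simp only [pvKey]
  split_ifs with hc
  · rw [hu, hv, hz]
  · simp only [List.zipWith_cons_cons, List.sum_cons, hu, hv, hz]
    simp

theorem pvStep_cons (c : Char) {u v : List Char} (h : pvStep u v) : pvStep (c :: u) (c :: v) := by
  cases h with
  | xl a b =>
    have := pvStep.xl (c :: a) b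
    simpa using this
  | rx a b =>
    have := pvStep.rx (c :: a) b
    simpa using this

theorem pvStep_length {s t : List Char} (h : pvStep s t) : s.length = t.length := by
  cases h <;> simp

-- ---------- Reach → Cond ----------

theorem pvCond_refl (e : List Char) : pvCond e e := ⟨rfl, forall₂_pvRel_refl _⟩

theorem pvCond_of_step {s t e : List Char} (hst : pvStep s t) (h : pvCond t e) : pvCond s e := by
  obtain ⟨h1, h2⟩ := h
  cases hst with
  | xl a b =>
    refine ⟨by simpa using h1, ?_⟩
    rw [pvKey_append, pvKey_LX] at h2
    rw [pvKey_append, pvKey_XL]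
    refine forall₂_replace_at _ _ _ _ _ h2 ?_
    rintro q ⟨hq1, hq2, hq3, hq4⟩
    refine ⟨hq1, fun _ => by have := hq2 (by rfl); omega, fun hh => by simp at hh, fun hh _ => by simp at hh⟩
  | rx a b =>
    refine ⟨by simpa using h1, ?_⟩
    rw [pvKey_append, pvKey_XR] at h2
    rw [pvKey_append, pvKey_RX]
    refine forall₂_replace_at _ _ _ _ _ h2 ?_
    rintro q ⟨hq1, hq2, hq3, hq4⟩
    refine ⟨hq1, fun hh => by simp at hh, fun _ => by have := hq3 (by rfl); omega, fun _ hh => by simp at hh⟩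

theorem pvCond_of_reach {s e : List Char} (h : pvReach s e) : pvCond s e := by
  induction h using Relation.ReflTransGen.head_induction_on with
  | refl => exact pvCond_refl e
  | head hstep _ ih => exact pvCond_of_step hstep ih


-- ---------- Cond → Reach: progress ----------

theorem forall₂_replace_pair {R : Int × Char → Int × Char → Prop} (xs : List (Int × Char)) :
    ∀ (p p' : Int × Char) (ys zs1 : List (Int × Char)) (q : Int × Char) (zs2 : List (Int × Char)),
    zs1.length = xs.length → List.Forall₂ R (xs ++ p :: ys) (zs1 ++ q :: zs2) → R p' q →
    List.Forall₂ R (xs ++ p' :: ys) (zs1 ++ q :: zs2) := by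
  induction xs with
  | nil =>
    intro p p' ys zs1 q zs2 hlen h hq
    rw [List.length_eq_zero_iff.mp hlen] at *
    cases h with
    | cons _ htail => exact List.Forall₂.cons hq htail
  | cons x xt ih =>
    intro p p' ys zs1 q zs2 hlen h hq
    cases zs1 with
    | nil => simp at hlen
    | cons z zt =>
      simp only [List.cons_append] at h ⊢
      cases h with
      | cons hxz htail =>
        exact List.Forall₂.cons hxz (ih p p' ys zt q zs2 (by simpa using hlen) htail hq)

theorem pvFirstX (s : List Char) (h : 'X' ∈ s) : ∃ pre t, s = pre ++ 'X' :: t ∧ 'X' ∉ pre := by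
  induction s with
  | nil => simp at h
  | cons c u ih =>
    by_cases hc : c = 'X'
    · exact ⟨[], u, by rw [hc]; simp, by simp⟩
    · have hu : 'X' ∈ u := by
        rcases List.mem_cons.mp h with h1 | h1
        · exact absurd h1.symm hc
        · exact h1
      obtain ⟨pre, t, h1, h2⟩ := ih hu
      exact ⟨c :: pre, t, by rw [h1]; simp, by
        intro hmem
        rcases List.mem_cons.mp hmem with h3 | h3
        · exact hc h3.symm
        · exact h2 h3⟩

theorem pvProgress (s : List Char) : ∀ (e : List Char), pvCond s e → s ≠ e →
    ∃ s₂, pvStep s s₂ ∧ pvCond s₂ e ∧ pvD s₂ e < pvD s e := by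
  induction s with
  | nil =>
    intro e h hne
    obtain ⟨h1, -⟩ := h
    exact absurd (List.eq_nil_of_length_eq_zero h1.symm).symm hne
  | cons x s' ih =>
    intro e h hne
    cases e with
    | nil => exact absurd (List.eq_nil_of_length_eq_zero h.1) (by simp)
    | cons y e' =>
      by_cases hxy : x = y
      · subst hxy
        have hne' : s' ≠ e' := fun hh => hne (by rw [hh])
        obtain ⟨s₂', h1, h2, h3⟩ := ih e' ((pvCond_cons x s' e').mp h) hne'
        exact ⟨x :: s₂', pvStep_cons x h1, (pvCond_cons x s₂' e').mpr h2,
          by rw [pvD_cons, pvD_cons]; exact h3⟩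
      · obtain ⟨hlen, h2⟩ := h
        by_cases hy : y = 'X'
        · -- e starts with 'X'; then x = 'R' and the first 'R'-block rider steps right
          subst hy
          have hx : x ≠ 'X' := hxy
          have hKs : pvKey 0 (x :: s') = (0, x) :: pvKey 1 s' := by
            simp [pvKey, hx]
          have hKe : pvKey 0 ('X' :: e') = pvKey 1 e' := by simp [pvKey]
          rw [hKs, hKe] at h2
          cases hke : pvKey 1 e' with
          | nil => rw [hke] at h2; cases h2
          | cons q Kr =>
            rw [hke] at h2
            have hq1 : (1 : Int) ≤ q.1 := by
              have := pvKey_pos_ge e' 1 [] q Kr hke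
              simpa using this
            cases h2 with
            | cons hrel htail =>
              obtain ⟨hc1, hc2, hc3, hc4⟩ := hrel
              have hxR : x = 'R' := by
                by_cases hL : x = 'L'
                · have := hc2 hL; simp at this; omega
                · by_cases hR : x = 'R'
                  · exact hR
                  · have := hc4 hL hR; simp at this; omega
              subst hxR
              -- s contains an 'X'
              have hXmem : 'X' ∈ 'R' :: s' := by
                by_contra hno
                have hlen1 : (pvKey 0 ('R' :: s')).length = ('R' :: s').length :=
                  pvKey_length_of_noX _ hno 0
                have hlen2 : (pvKey 0 ('R' :: s')).length = (pvKey 0 ('X' :: e')).length := by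
                  rw [hKs, hKe, hke]
                  exact List.Forall₂.length_eq (List.Forall₂.cons ⟨hc1, hc2, hc3, hc4⟩ htail)
                have hlen3 : (pvKey 0 ('X' :: e')).length ≤ e'.length := by
                  rw [hKe]; exact pvKey_length_le e' 1
                simp only [List.length_cons] at hlen1 hlen
                omega
              obtain ⟨pre, t, hs, hnopre⟩ := pvFirstX _ hXmem
              -- pre is nonempty since s starts with 'R'
              cases pre with
              | nil => simp at hs
              | cons p0 pr =>
                obtain ⟨p, r, hpr⟩ : ∃ p r, (p0 :: pr : List Char) = p ++ [r] :=
                  ⟨(p0 :: pr).dropLast, (p0 :: pr).getLast (by simp), (List.dropLast_append_getLast (by simp)).symm⟩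
                rw [hpr] at hs hnopre
                have hnop : 'X' ∉ p := fun hh => hnopre (List.mem_append_left _ hh)
                have hnr : r ≠ 'X' := fun hh => hnopre (by simp [hh])
                have hs2 : 'R' :: s' = p ++ r :: 'X' :: t := by rw [hs]; simp
                -- key of s
                have hKmid : ∀ off : Int, pvKey off (r :: 'X' :: t) = (off, r) :: pvKey (off + 2) t := by
                  intro off
                  have harith : off + 1 + 1 = off + 2 := by ring
                  simp [pvKey, hnr, harith]
                have hkeys : pvKey 0 ('R' :: s') = pvKey 0 p ++ (((p.length : Int)), r) :: pvKey ((p.length : Int) + 2) t := by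
                  rw [hs2, pvKey_append, hKmid]
                  simp
                have hKplen : (pvKey 0 p).length = p.length := pvKey_length_of_noX p hnop 0
                -- decompose the partner of (p.length, r)
                have h2' : List.Forall₂ pvRel (pvKey 0 p ++ ((p.length : Int), r) :: pvKey ((p.length : Int) + 2) t)
                    (pvKey 0 ('X' :: e')) := by
                  rw [← hkeys, hKs, hKe, hke]
                  exact List.Forall₂.cons ⟨hc1, hc2, hc3, hc4⟩ htail
                obtain ⟨zs1, qq, zs2, hze, hzlen, hrelq⟩ := forall₂_decomp _ _ _ _ h2'
                have hqq1 : ((p.length : Int)) + 1 ≤ qq.1 := by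
                  have he2 : pvKey 1 e' = zs1 ++ qq :: zs2 := by rw [← hKe]; exact hze
                  have hge := pvKey_pos_ge e' 1 zs1 qq zs2 he2
                  rw [hzlen, hKplen] at hge
                  omega
                -- r must be 'R'
                obtain ⟨hr1, hr2, hr3, hr4⟩ := hrelq
                have hrR : r = 'R' := by
                  by_cases hL : r = 'L'
                  · have := hr2 hL; simp at this; omega
                  · by_cases hR : r = 'R'
                    · exact hR
                    · have := hr4 hL hR; simp at this; omega
                subst hrR
                refine ⟨p ++ 'X' :: 'R' :: t, by rw [hs2]; exact pvStep.rx p t, ?_, ?_⟩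
                · constructor
                  · have hlc := congrArg List.length hs2
                    simp only [List.length_append, List.length_cons] at hlc ⊢
                    simp only [List.length_cons] at hlen
                    omega
                  · have hkeys2 : pvKey 0 (p ++ 'X' :: 'R' :: t) =
                        pvKey 0 p ++ (((p.length : Int)) + 1, 'R') :: pvKey ((p.length : Int) + 2) t := by
                      rw [pvKey_append, pvKey_XR]
                      simp
                    rw [hkeys2, hze]
                    refine forall₂_replace_pair _ _ _ _ _ _ _ (by rw [hzlen, hKplen]) (by rw [← hze]; exact h2') ?_
                    exact ⟨hr1, fun hh => by simp at hh, fun _ => hqq1, fun _ hh => by simp at hh⟩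
                · unfold pvD
                  have hkeys2 : pvKey 0 (p ++ 'X' :: 'R' :: t) =
                      pvKey 0 p ++ (((p.length : Int)) + 1, 'R') :: pvKey ((p.length : Int) + 2) t := by
                    rw [pvKey_append, pvKey_XR]
                    simp
                  rw [hkeys2, hkeys, hze]
                  rw [List.zipWith_append hzlen.symm, List.zipWith_append hzlen.symm]
                  simp only [List.zipWith_cons_cons, List.sum_append, List.sum_cons]
                  have : ((p.length : Int) + 1 - qq.1).natAbs < ((p.length : Int) - qq.1).natAbs := by omega
                  omega
        · -- e starts with a non-'X' character y
          have hKe : pvKey 0 (y :: e') = (0, y) :: pvKey 1 e' := by simp [pvKey, hy]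
          by_cases hx : x = 'X'
          · subst hx
            have hKs : pvKey 0 ('X' :: s') = pvKey 1 s' := by simp [pvKey]
            rw [hKs, hKe] at h2
            cases hks : pvKey 1 s' with
            | nil => rw [hks] at h2; cases h2
            | cons q Ks =>
              rw [hks] at h2
              have hq1 : (1 : Int) ≤ q.1 := by
                have := pvKey_pos_ge s' 1 [] q Ks hks
                simpa using this
              cases h2 with
              | cons hrel htail =>
                obtain ⟨hc1, hc2, hc3, hc4⟩ := hrel
                have hyL : y = 'L' := by
                  by_cases hL : q.2 = 'L'
                  · exact hc1.symm.trans hL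
                  · by_cases hR : q.2 = 'R'
                    · have := hc3 hR; simp at this; omega
                    · have := hc4 hL hR; simp at this; omega
                subst hyL
                have hcL : q.2 = 'L' := hc1
                -- decompose s: i copies of X then the L
                have hks0 : pvKey 0 ('X' :: s') = (q.1, 'L') :: Ks := by
                  rw [hKs, hks, ← hcL]
                obtain ⟨t, hdec, hKs2, -⟩ := pvKey_head_decomp _ 0 q.1 'L' Ks hks0
                have htoNat : (q.1 - 0).toNat = (q.1 - 1).toNat + 1 := by omega
                rw [htoNat, List.replicate_succ'] at hdec
                have hdec2 : 'X' :: s' = List.replicate (q.1 - 1).toNat 'X' ++ 'X' :: 'L' :: t := by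
                  rw [hdec]; simp
                refine ⟨List.replicate (q.1 - 1).toNat 'X' ++ 'L' :: 'X' :: t,
                  by rw [hdec2]; exact pvStep.xl _ t, ?_, ?_⟩
                · constructor
                  · have hlc := congrArg List.length hdec2
                    simp only [List.length_append, List.length_cons, List.length_replicate] at hlc ⊢
                    simp only [List.length_cons] at hlen
                    omega
                  · have hkeys2 : pvKey 0 (List.replicate (q.1 - 1).toNat 'X' ++ 'L' :: 'X' :: t) =
                        (q.1 - 1, 'L') :: pvKey (q.1 + 1) t := by
                      rw [pvKey_append, pvKey_replicate_X, pvKey_LX]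
                      simp only [List.nil_append, List.length_replicate, zero_add]
                      have h1 : (((q.1 - 1).toNat : Int)) = q.1 - 1 := by omega
                      rw [h1]
                      have h2 : q.1 - 1 + 2 = q.1 + 1 := by ring
                      rw [h2]
                    rw [hkeys2, hKe]
                    refine List.Forall₂.cons ⟨rfl, fun _ => by omega, fun hh => by simp at hh, fun hh _ => by simp at hh⟩ ?_
                    rw [← hKs2]
                    exact htail
                · unfold pvD
                  have hkeys2 : pvKey 0 (List.replicate (q.1 - 1).toNat 'X' ++ 'L' :: 'X' :: t) =
                      (q.1 - 1, 'L') :: pvKey (q.1 + 1) t := by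
                    rw [pvKey_append, pvKey_replicate_X, pvKey_LX]
                    simp only [List.nil_append, List.length_replicate, zero_add]
                    have h1 : (((q.1 - 1).toNat : Int)) = q.1 - 1 := by omega
                    rw [h1]
                    have h2 : q.1 - 1 + 2 = q.1 + 1 := by ring
                    rw [h2]
                  rw [hkeys2, hks0, hKe, ← hKs2]
                  simp only [List.zipWith_cons_cons, List.sum_cons]
                  have : (q.1 - 1 - 0).natAbs < (q.1 - 0).natAbs := by omega
                  omega
          · -- both heads non-'X': they must be equal, contradiction
            have hKs : pvKey 0 (x :: s') = (0, x) :: pvKey 1 s' := by simp [pvKey, hx]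
            rw [hKs, hKe] at h2
            cases h2 with
            | cons hrel _ => exact absurd hrel.1 hxy

theorem pvReach_of_cond_aux : ∀ (n : Nat) (s e : List Char), pvD s e ≤ n → pvCond s e → pvReach s e := by
  intro n
  induction n with
  | zero =>
    intro s e hD h
    by_cases hse : s = e
    · rw [hse]; exact Relation.ReflTransGen.refl
    · obtain ⟨s₂, -, -, hlt⟩ := pvProgress s e h hse
      omega
  | succ m ih =>
    intro s e hD h
    by_cases hse : s = e
    · rw [hse]; exact Relation.ReflTransGen.refl
    · obtain ⟨s₂, hstep, hcond, hlt⟩ := pvProgress s e h hse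
      exact Relation.ReflTransGen.head hstep (ih s₂ e (by omega) hcond)

theorem pvReach_of_cond {s e : List Char} (h : pvCond s e) : pvReach s e :=
  pvReach_of_cond_aux (pvD s e) s e (le_refl _) h


-- ---------- the children generated by A's inner loop ----------

def pvKids (pre : List Char) : List Char → List (List Char)
  | c1 :: c2 :: t =>
    (if c1 = 'X' ∧ c2 = 'L' then [pre ++ 'L' :: 'X' :: t]
     else if c1 = 'R' ∧ c2 = 'X' then [pre ++ 'X' :: 'R' :: t] else []) ++
    pvKids (pre ++ [c1]) (c2 :: t)
  | _ => []

theorem pvKids_le (rest : List Char) : ∀ pre, (pvKids pre rest).length ≤ rest.length := by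
  induction rest with
  | nil => intro pre; simp [pvKids]
  | cons c1 u ih =>
    intro pre
    cases u with
    | nil => simp [pvKids]
    | cons c2 t =>
      simp only [pvKids, List.length_append, List.length_cons]
      have := ih (pre ++ [c1])
      simp only [List.length_cons] at this
      split_ifs <;> simp <;> omega

theorem pvKids_sub (rest : List Char) : ∀ (pre c : List Char), c ∈ pvKids pre rest → pvStep (pre ++ rest) c := by
  induction rest with
  | nil => intro pre c h; simp [pvKids] at h
  | cons c1 u ih =>
    intro pre c h
    cases u with
    | nil => simp [pvKids] at h
    | cons c2 t =>
      simp only [pvKids, List.mem_append] at h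
      rcases h with h | h
      · split_ifs at h with h1 h2
        · obtain ⟨hx, hl⟩ := h1
          subst hx; subst hl
          simp only [List.mem_singleton] at h
          subst h
          exact pvStep.xl pre t
        · obtain ⟨hr, hx⟩ := h2
          subst hr; subst hx
          simp only [List.mem_singleton] at h
          subst h
          exact pvStep.rx pre t
        · simp at h
      · have := ih (pre ++ [c1]) c h
        simpa [List.append_assoc] using this

theorem pvKids_mem_xl (a : List Char) : ∀ (pre b : List Char), pre ++ a ++ 'L' :: 'X' :: b ∈ pvKids pre (a ++ 'X' :: 'L' :: b) := by
  induction a with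
  | nil =>
    intro pre b
    simp [pvKids]
  | cons h a' ih =>
    intro pre b
    cases ha : a' ++ 'X' :: 'L' :: b with
    | nil => simp at ha
    | cons c2 t =>
      have : (h :: a') ++ 'X' :: 'L' :: b = h :: c2 :: t := by rw [← ha]; simp
      rw [this]
      simp only [pvKids, List.mem_append]
      right
      have := ih (pre ++ [h]) b
      rw [ha] at this
      simpa [List.append_assoc] using this

theorem pvKids_mem_rx (a : List Char) : ∀ (pre b : List Char), pre ++ a ++ 'X' :: 'R' :: b ∈ pvKids pre (a ++ 'R' :: 'X' :: b) := by
  induction a with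
  | nil =>
    intro pre b
    simp [pvKids]
  | cons h a' ih =>
    intro pre b
    cases ha : a' ++ 'R' :: 'X' :: b with
    | nil => simp at ha
    | cons c2 t =>
      have : (h :: a') ++ 'R' :: 'X' :: b = h :: c2 :: t := by rw [← ha]; simp
      rw [this]
      simp only [pvKids, List.mem_append]
      right
      have := ih (pre ++ [h]) b
      rw [ha] at this
      simpa [List.append_assoc] using this

theorem pvStep_iff_kids {node c : List Char} : pvStep node c ↔ c ∈ pvKids [] node := by
  constructor
  · intro h
    cases h with
    | xl a b => have := pvKids_mem_xl a [] b; simpa using this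
    | rx a b => have := pvKids_mem_rx a [] b; simpa using this
  · intro h
    have := pvKids_sub node [] c h
    simpa using this

theorem pvStep_perm {s t : List Char} (h : pvStep s t) : s.Perm t := by
  cases h with
  | xl a b => exact List.Perm.append_left a (List.Perm.swap 'L' 'X' b)
  | rx a b => exact List.Perm.append_left a (List.Perm.swap 'X' 'R' b)

-- ---------- a potential strictly increasing along moves ----------

def pvPhiA (n : Nat) : Nat → List Char → Nat
  | _, [] => 0
  | off, c :: t => (if c = 'R' then off else if c = 'L' then n - off else 0) + pvPhiA n (off + 1) t

def pvPhi (s : List Char) : Nat := pvPhiA s.length 0 s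

theorem pvPhiA_append (a : List Char) : ∀ (b : List Char) (n off : Nat),
    pvPhiA n off (a ++ b) = pvPhiA n off a + pvPhiA n (off + a.length) b := by
  induction a with
  | nil => intro b n off; simp [pvPhiA]
  | cons c u ih =>
    intro b n off
    have hco : off + (u.length + 1) = off + 1 + u.length := by omega
    simp only [List.cons_append, pvPhiA, List.length_cons, hco, ih b n (off + 1)]
    omega

theorem pvPhi_lt_of_step {s t : List Char} (h : pvStep s t) : pvPhi s < pvPhi t := by
  have hlen := pvStep_length h
  cases h with
  | xl a b =>
    unfold pvPhi
    rw [hlen] at *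
    rw [pvPhiA_append, pvPhiA_append]
    simp only [pvPhiA]
    simp only [List.length_append, List.length_cons]
    simp
    omega
  | rx a b =>
    unfold pvPhi
    rw [hlen] at *
    rw [pvPhiA_append, pvPhiA_append]
    simp only [pvPhiA]
    simp only [List.length_append, List.length_cons]
    simp


-- ---------- paths avoiding the visited set ----------

inductive pvPA (V : List (List Char)) : List Char → List Char → Prop
  | refl (s : List Char) : pvPA V s s
  | head {s u t : List Char} : pvStep s u → u ∉ V → pvPA V u t → pvPA V s t

theorem pvPA_sub {V V' : List (List Char)} {s t : List Char} (h : pvPA V s t)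
    (hsub : ∀ x, x ∈ V' → x ∈ V) : pvPA V' s t := by
  induction h with
  | refl s => exact pvPA.refl s
  | head hstep hnm _ ih => exact pvPA.head hstep (fun hh => hnm (hsub _ hh)) ih

theorem pvPA_insert {V V' : List (List Char)} {u t x : List Char} (h : pvPA V u t)
    (hsub : ∀ z, z ∈ V' → z ∈ V ∨ z = x) : pvPhi x < pvPhi u → pvPA V' u t := by
  induction h with
  | refl s => intro _; exact pvPA.refl s
  | @head s w t' hstep hnm htail ih =>
    intro hphi
    have hphi2 : pvPhi x < pvPhi w := lt_trans hphi (pvPhi_lt_of_step hstep)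
    refine pvPA.head hstep ?_ (ih hphi2)
    intro hw
    rcases hsub _ hw with h1 | h1
    · exact hnm h1
    · rw [h1] at hphi2; exact absurd hphi2 (lt_irrefl _)

theorem pvPA_split {V : List (List Char)} {q t : List Char} (h : pvPA V q t) :
    ∀ x, pvPA (x :: V) q t ∨ pvPA V x t := by
  induction h with
  | refl s => intro x; left; exact pvPA.refl s
  | @head s w t' hstep hnm htail ih =>
    intro x
    rcases ih x with h1 | h1
    · by_cases hwx : w = x
      · right; rw [← hwx]; exact htail
      · left
        refine pvPA.head hstep ?_ h1
        intro hw
        rcases List.mem_cons.mp hw with h2 | h2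
        · exact hwx h2
        · exact hnm h2
    · right; exact h1

theorem pvPA_of_reach {s t : List Char} (h : pvReach s t) : pvPA [] s t := by
  induction h using Relation.ReflTransGen.head_induction_on with
  | refl => exact pvPA.refl t
  | head hstep _ ih => exact pvPA.head hstep (by simp) ih

-- ---------- the inner for-loop computes exactly the children ----------

theorem pvSet_add_idem (v : PySem.Set (List Char)) (x : List Char) :
    PySem.Set.add (PySem.Set.add v x) x = PySem.Set.add v x := by
  apply PySem.Set.add_of_mem
  rw [PySem.Set.mem_add]
  right; rfl

theorem pvFold_eq (node : List Char) : ∀ (k i : Nat) (q : List (List Char)) (v : PySem.Set (List Char)),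
    node.length = i + k →
    (PySem.List.pyRange (i : Int) (node.length : Int) 1).foldl (pvLoopBody node) (q, v) =
      (q ++ pvKids (node.take i) (node.drop i),
       if pvKids (node.take i) (node.drop i) = [] then v else PySem.Set.add v node) := by
  intro k
  induction k with
  | zero =>
    intro i q v hik
    rw [PySem.List.pyRange_one_eq_nil (by push_cast; omega)]
    have hdrop : node.drop i = [] := List.drop_eq_nil_of_le (by omega)
    simp [hdrop, pvKids]
  | succ k' ih =>
    intro i q v hik
    have hi : (i : Int) < (node.length : Int) := by push_cast; omega
    rw [PySem.List.pyRange_one_cons hi, List.foldl_cons]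
    have hlt : i < node.length := by omega
    cases hdrop : node.drop i with
    | nil =>
      exfalso
      have := List.length_drop (l := node) (i := i)
      rw [hdrop] at this
      simp at this
      omega
    | cons c1 u =>
      have hget1 : node[i]? = some c1 := by
        have h0 : (node.drop i)[0]? = node[i + 0]? := List.getElem?_drop
        rw [hdrop] at h0
        simpa using h0.symm
      cases u with
      | nil =>
        -- i + 1 = node.length: the loop body does nothing at this index
        have hlen2 : node.length = i + 1 := by
          have := List.length_drop (l := node) (i := i)
          rw [hdrop] at this
          simp at this
          omega
        have hbody : pvLoopBody node (q, v) (i : Int) = (q, v) := by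
          unfold pvLoopBody
          rw [if_neg (by push_cast; omega)]
        rw [hbody]
        have hcast : ((i : Int) + 1) = ((i + 1 : Nat) : Int) := by push_cast; ring
        rw [hcast, ih (i + 1) q v (by omega)]
        have hdrop2 : node.drop (i + 1) = [] := List.drop_eq_nil_of_le (by omega)
        rw [hdrop2]
        simp [pvKids]
      | cons c2 t =>
        have hget2 : node[i + 1]? = some c2 := by
          have h1 : (node.drop i)[1]? = node[i + 1]? := List.getElem?_drop
          rw [hdrop] at h1
          simpa using h1.symm
        have htake1 : node.take (i + 1) = node.take i ++ [c1] := by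
          rw [List.take_succ, hget1]
          rfl
        have hdrop1 : node.drop (i + 1) = c2 :: t := by
          have : node.drop (i + 1) = (node.drop i).drop 1 := by
            rw [List.drop_drop]
          rw [this, hdrop]
          rfl
        have hdrop2 : node.drop (i + 2) = t := by
          have : node.drop (i + 2) = (node.drop i).drop 2 := by
            rw [List.drop_drop]
          rw [this, hdrop]
          rfl
        have hilen : i + 1 < node.length := by
          have := List.length_drop (l := node) (i := i)
          rw [hdrop] at this
          simp at this
          omega
        have hbody : pvLoopBody node (q, v) (i : Int) =
            (if c1 = 'X' ∧ c2 = 'L' then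
              (q ++ [node.take i ++ 'L' :: 'X' :: t], PySem.Set.add v node)
             else if c1 = 'R' ∧ c2 = 'X' then
              (q ++ [node.take i ++ 'X' :: 'R' :: t], PySem.Set.add v node)
             else (q, v)) := by
          unfold pvLoopBody
          rw [if_pos (by push_cast; omega)]
          have e1 : PySem.List.pyGet? node (i : Int) = some c1 := by
            rw [PySem.List.pyGet?_natCast]
            exact hget1
          have e2 : PySem.List.pyGet? node ((i : Int) + 1) = some c2 := by
            rw [show ((i : Int) + 1) = ((i + 1 : Nat) : Int) from by push_cast; ring,
              PySem.List.pyGet?_natCast]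
            exact hget2
          rw [e1, e2]
          have e3 : PySem.List.slice node none (some (i : Int)) = node.take i :=
            PySem.List.slice_to_natCast ..
          have e4 : PySem.List.slice node (some ((i : Int) + 2)) none = t := by
            rw [show ((i : Int) + 2) = ((i + 2 : Nat) : Int) from by push_cast; ring,
              PySem.List.slice_from_natCast, hdrop2]
          simp only [e3, e4]
        rw [hbody]
        have hkids : pvKids (node.take i) (c1 :: c2 :: t) =
            (if c1 = 'X' ∧ c2 = 'L' then [node.take i ++ 'L' :: 'X' :: t]
             else if c1 = 'R' ∧ c2 = 'X' then [node.take i ++ 'X' :: 'R' :: t] else []) ++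
            pvKids (node.take (i + 1)) (node.drop (i + 1)) := by
          rw [htake1, hdrop1]
          rfl
        have hcast : ((i : Int) + 1) = ((i + 1 : Nat) : Int) := by push_cast; ring
        rw [hcast]
        by_cases h1 : c1 = 'X' ∧ c2 = 'L'
        · rw [if_pos h1, ih (i + 1) (q ++ [node.take i ++ 'L' :: 'X' :: t]) (PySem.Set.add v node) (by omega)]
          rw [hkids, if_pos h1]
          by_cases h3 : pvKids (node.take (i + 1)) (node.drop (i + 1)) = [] <;>
            simp [h3, pvSet_add_idem]
        · rw [if_neg h1]
          by_cases h2 : c1 = 'R' ∧ c2 = 'X'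
          · rw [if_pos h2, ih (i + 1) (q ++ [node.take i ++ 'X' :: 'R' :: t]) (PySem.Set.add v node) (by omega)]
            rw [hkids, if_neg h1, if_pos h2]
            by_cases h3 : pvKids (node.take (i + 1)) (node.drop (i + 1)) = [] <;>
              simp [h3, pvSet_add_idem]
          · rw [if_neg h2, ih (i + 1) q v (by omega)]
            rw [hkids, if_neg h1, if_neg h2]
            simp

theorem pvFold_zero (node : List Char) (q : List (List Char)) (v : PySem.Set (List Char)) :
    (PySem.List.pyRange 0 (node.length : Int) 1).foldl (pvLoopBody node) (q, v) =
      (q ++ pvKids [] node, if pvKids [] node = [] then v else PySem.Set.add v node) := by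
  have := pvFold_eq node node.length 0 q v (by omega)
  simpa using this


-- ---------- BFS soundness ----------

theorem pvBFS_sound (endL startL : List Char) : ∀ (fuel : Nat) (queue : List (List Char)) (v : PySem.Set (List Char)),
    (∀ q ∈ queue, pvReach startL q) → pvBFS endL fuel queue v = true → pvReach startL endL := by
  intro fuel
  induction fuel with
  | zero => intro queue v _ h; simp [pvBFS] at h
  | succ f ih =>
    intro queue v hq h
    cases queue with
    | nil => simp [pvBFS] at h
    | cons node rest =>
      simp only [pvBFS] at h
      by_cases h1 : node = endL
      · rw [← h1]; exact hq node (by simp)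
      · rw [if_neg h1] at h
        by_cases h2 : PySem.Set.contains v node = true
        · rw [if_pos h2] at h
          exact ih rest v (fun q hq' => hq q (List.mem_cons_of_mem _ hq')) h
        · rw [if_neg h2] at h
          simp only [pvFold_zero] at h
          refine ih (rest ++ pvKids [] node) _ ?_ h
          intro q hqm
          rcases List.mem_append.mp hqm with hmem | hmem
          · exact hq q (List.mem_cons_of_mem _ hmem)
          · exact Relation.ReflTransGen.tail (hq node (by simp)) (pvStep_iff_kids.mpr hmem)

-- ---------- BFS completeness ----------

theorem pvCard_le (V L : List (List Char)) (hn : V.Nodup) (hsub : ∀ z ∈ V, z ∈ L) :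
    V.length ≤ L.dedup.length := by
  have h1 : V.toFinset.card = V.length := List.toFinset_card_of_nodup hn
  have h3 : V.toFinset ⊆ L.toFinset := fun x hx => List.mem_toFinset.mpr (hsub x (List.mem_toFinset.mp hx))
  calc V.length = V.toFinset.card := h1.symm
    _ ≤ L.toFinset.card := Finset.card_le_card h3
    _ = L.dedup.length := List.card_toFinset L

theorem pvBFS_complete (startL endL : List Char) : ∀ (fuel : Nat) (queue : List (List Char)) (v : PySem.Set (List Char)),
    (∀ q ∈ queue, q.Perm startL) → (∀ z ∈ v, z.Perm startL) → v.Nodup →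
    queue.length + startL.length * (startL.permutations.dedup.length - v.length) ≤ fuel →
    (∃ q, q ∈ queue ∧ q ∉ v ∧ pvPA v q endL) →
    pvBFS endL fuel queue v = true := by
  intro fuel
  induction fuel with
  | zero =>
    intro queue v _ _ _ hm hw
    obtain ⟨q, hq, -, -⟩ := hw
    have hq0 : queue.length = 0 := by omega
    rw [List.length_eq_zero_iff.mp hq0] at hq
    simp at hq
  | succ f ih =>
    intro queue v hqp hvp hvn hm hw
    cases queue with
    | nil => obtain ⟨q, hq, -⟩ := hw; simp at hq
    | cons node rest =>
      simp only [pvBFS]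
      by_cases h1 : node = endL
      · rw [if_pos h1]
      · rw [if_neg h1]
        by_cases h2 : PySem.Set.contains v node = true
        · rw [if_pos h2]
          have hnodein : node ∈ v := (PySem.Set.contains_iff _ _).mp h2
          obtain ⟨q, hq, hqv, hqpa⟩ := hw
          have hqn : q ≠ node := fun he => hqv (he ▸ hnodein)
          have hqrest : q ∈ rest := by
            rcases List.mem_cons.mp hq with he | he
            · exact absurd he hqn
            · exact he
          refine ih rest v (fun z hz => hqp z (List.mem_cons_of_mem _ hz)) hvp hvn ?_ ⟨q, hqrest, hqv, hqpa⟩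
          simp only [List.length_cons] at hm
          omega
        · rw [if_neg h2]
          have hnodev : node ∉ v := fun hh => h2 ((PySem.Set.contains_iff _ _).mpr hh)
          simp only [pvFold_zero]
          have hperm_node : node.Perm startL := hqp node (by simp)
          have hperm_kids : ∀ u ∈ pvKids [] node, u.Perm startL := fun u hu =>
            ((pvStep_perm (pvStep_iff_kids.mpr hu)).symm).trans hperm_node
          have hqp' : ∀ z ∈ rest ++ pvKids [] node, z.Perm startL := by
            intro z hz
            rcases List.mem_append.mp hz with hz1 | hz1
            · exact hqp z (List.mem_cons_of_mem _ hz1)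
            · exact hperm_kids z hz1
          have hvp' : ∀ z ∈ PySem.Set.add v node, z.Perm startL := by
            intro z hz
            rcases (PySem.Set.mem_add _ _ _).mp hz with hz1 | hz1
            · exact hvp z hz1
            · exact hz1 ▸ hperm_node
          have hvn' : (PySem.Set.add v node).Nodup := PySem.Set.nodup_add v node hvn
          have hlenv' : (PySem.Set.add v node).length = v.length + 1 := by
            rw [PySem.Set.add_of_not_mem hnodev]
            simp
          have hvltP : v.length + 1 ≤ startL.permutations.dedup.length := by
            have := pvCard_le (PySem.Set.add v node) startL.permutations hvn'
              (fun z hz => List.mem_permutations.mpr (hvp' z hz))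
            rw [hlenv'] at this
            exact this
          have hkidlen : (pvKids [] node).length ≤ startL.length := by
            have h4 := pvKids_le node []
            have h5 := hperm_node.length_eq
            omega
          have hmeas : (rest ++ pvKids [] node).length +
              startL.length * (startL.permutations.dedup.length - (PySem.Set.add v node).length) ≤ f := by
            have hmul : startL.length * (startL.permutations.dedup.length - v.length) =
                startL.length * (startL.permutations.dedup.length - v.length - 1) + startL.length := by
              have h5 : startL.permutations.dedup.length - v.length =
                  (startL.permutations.dedup.length - v.length - 1) + 1 := by omega
              have h6 := Nat.mul_succ startL.length (startL.permutations.dedup.length - v.length - 1)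
              rw [Nat.succ_eq_add_one, ← h5] at h6
              exact h6
            rw [hlenv', List.length_append,
              show startL.permutations.dedup.length - (List.length v + 1) =
                startL.permutations.dedup.length - List.length v - 1 from by omega]
            simp only [List.length_cons] at hm
            omega
          have finishNode : pvPA v node endL →
              pvBFS endL f (rest ++ pvKids [] node)
                (if pvKids [] node = [] then v else PySem.Set.add v node) = true := by
            intro hpa
            cases hpa with
            | refl => exact absurd rfl h1
            | head hstep hnm htail =>
              rename_i u
              have hu_k : u ∈ pvKids [] node := pvStep_iff_kids.mp hstep
              have hphi : pvPhi node < pvPhi u := pvPhi_lt_of_step hstep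
              have hune : u ≠ node := fun he => by rw [he] at hphi; exact absurd hphi (lt_irrefl _)
              have hkne : pvKids [] node ≠ [] := List.ne_nil_of_mem hu_k
              rw [if_neg hkne]
              refine ih (rest ++ pvKids [] node) (PySem.Set.add v node) hqp' hvp' hvn' hmeas ?_
              refine ⟨u, List.mem_append_right _ hu_k, ?_, ?_⟩
              · intro hh
                rcases (PySem.Set.mem_add _ _ _).mp hh with hh1 | hh1
                · exact hnm hh1
                · exact hune hh1
              · exact pvPA_insert htail (fun z hz => (PySem.Set.mem_add _ _ _).mp hz) hphi
          obtain ⟨q, hq, hqv, hqpa⟩ := hw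
          rcases pvPA_split hqpa node with hL | hR
          · by_cases hqn : q = node
            · subst hqn
              exact finishNode hqpa
            · have hqrest : q ∈ rest := by
                rcases List.mem_cons.mp hq with he | he
                · exact absurd he hqn
                · exact he
              by_cases hk : pvKids [] node = []
              · rw [if_pos hk]
                refine ih (rest ++ pvKids [] node) v hqp' hvp hvn ?_ ?_
                · rw [hk]
                  simp only [List.append_nil, List.length_cons] at hm ⊢
                  omega
                · exact ⟨q, List.mem_append_left _ hqrest, hqv,
                    pvPA_sub hL (fun x hx => List.mem_cons_of_mem _ hx)⟩
              · rw [if_neg hk]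
                refine ih (rest ++ pvKids [] node) (PySem.Set.add v node) hqp' hvp' hvn' hmeas ?_
                refine ⟨q, List.mem_append_left _ hqrest, ?_, ?_⟩
                · intro hh
                  rcases (PySem.Set.mem_add _ _ _).mp hh with hh1 | hh1
                  · exact hqv hh1
                  · exact hqn hh1
                · refine pvPA_sub hL ?_
                  intro x hx
                  rcases (PySem.Set.mem_add _ _ _).mp hx with hx1 | hx1
                  · exact List.mem_cons_of_mem _ hx1
                  · exact hx1 ▸ List.mem_cons_self ..
          · exact finishNode hR

-- ---------- A's port decides reachability ----------

theorem pvCanTransform_iff (start end_ : String) :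
    canTransform start end_ = true ↔ pvReach start.toList end_.toList := by
  unfold canTransform
  constructor
  · intro h
    refine pvBFS_sound end_.toList start.toList _ [start.toList] PySem.Set.empty ?_ h
    intro q hq
    simp at hq
    rw [hq]
    exact Relation.ReflTransGen.refl
  · intro h
    refine pvBFS_complete start.toList end_.toList _ [start.toList] PySem.Set.empty
      (by intro q hq; simp at hq; rw [hq]) (by intro z hz; simp [PySem.Set.empty] at hz) (by simp [PySem.Set.empty]) ?_
      ⟨start.toList, by simp, by simp [PySem.Set.empty], pvPA_of_reach h⟩
    have hP : start.toList.permutations.dedup.length ≤ Nat.factorial start.toList.length := by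
      have h1 : start.toList.permutations.dedup.length ≤ start.toList.permutations.length :=
        List.Sublist.length_le (List.dedup_sublist _)
      have h2 : start.toList.permutations.length = Nat.factorial start.toList.length :=
        List.length_permutations start.toList
      omega
    have h3 : start.toList.length * start.toList.permutations.dedup.length ≤
        start.toList.length * Nat.factorial start.toList.length :=
      Nat.mul_le_mul_left _ hP
    simp only [PySem.Set.empty, List.length_cons, List.length_nil, Nat.sub_zero]
    omega

-- ---------- B's port decides pvCond ----------

theorem pvKey_eq_filter_enum (s : List Char) : ∀ off : Int,
    (PySem.List.enumerate s off).filter (fun p => p.2 ≠ 'X') = pvKey off s := by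
  induction s with
  | nil => intro off; simp [PySem.List.enumerate_nil, pvKey]
  | cons c u ih =>
    intro off
    rw [PySem.List.enumerate_cons]
    by_cases hc : c = 'X'
    · simp only [pvKey, if_pos hc, List.filter_cons]
      rw [if_neg (by simp [hc])]
      exact ih (off + 1)
    · simp only [pvKey, if_neg hc, List.filter_cons]
      rw [if_pos (by simp [hc])]
      rw [ih (off + 1)]

theorem pvGoFilter : ∀ (fuel : Nat) (l acc : List Char), l.length ≤ fuel →
    PySem.Chars.replace.go ['X'] [] fuel l acc = acc.reverse ++ l.filter (fun c => decide (c ≠ 'X')) := by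
  intro fuel
  induction fuel with
  | zero =>
    intro l acc h
    have hl : l = [] := List.eq_nil_of_length_eq_zero (by omega)
    subst hl
    simp [PySem.Chars.replace.go]
  | succ f ih =>
    intro l acc h
    cases l with
    | nil => simp [PySem.Chars.replace.go]
    | cons c t =>
      rw [PySem.Chars.replace.go]
      simp only [List.length_cons] at h
      by_cases hc : c = 'X'
      · rw [if_pos (by simp [hc, List.isPrefixOf])]
        rw [List.filter_cons]
        simp only [hc]
        have := ih t acc (by omega)
        simpa using this
      · rw [if_neg (by simp [List.isPrefixOf]; exact fun hh => hc hh.symm)]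
        rw [ih t (c :: acc) (by omega)]
        simp [List.filter_cons, hc]

theorem pvRepl_eq_filter (s : List Char) :
    PySem.Chars.replace s ['X'] [] = s.filter (fun c => decide (c ≠ 'X')) := by
  rw [PySem.Chars.replace, if_neg (by simp), pvGoFilter s.length s [] (le_refl _)]
  simp

theorem pvFilter_iff (start end_ : String) :
    PySem.Str.replace start "X" "" = PySem.Str.replace end_ "X" "" ↔
      start.toList.filter (fun c => decide (c ≠ 'X')) = end_.toList.filter (fun c => decide (c ≠ 'X')) := by
  constructor
  · intro h
    have := congrArg String.toList h
    rw [PySem.Str.toList_replace, PySem.Str.toList_replace] at this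
    simpa [pvRepl_eq_filter] using this
  · intro h
    have h2 : (PySem.Str.replace start "X" "").toList = (PySem.Str.replace end_ "X" "").toList := by
      rw [PySem.Str.toList_replace, PySem.Str.toList_replace]
      simpa [pvRepl_eq_filter] using h
    exact String.toList_inj.mp h2

theorem pvKey_map_snd (s : List Char) : ∀ off : Int,
    (pvKey off s).map Prod.snd = s.filter (fun c => decide (c ≠ 'X')) := by
  induction s with
  | nil => intro off; simp [pvKey]
  | cons c t ih =>
    intro off
    rw [List.filter_cons]
    by_cases hc : c = 'X'
    · simp only [pvKey, if_pos hc, hc]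
      simpa using ih (off + 1)
    · simp only [pvKey, if_neg hc]
      rw [List.map_cons, ih (off + 1)]
      simp [hc]

theorem pvForall₂_snd {a b : List (Int × Char)} (h : List.Forall₂ pvRel a b) :
    a.map Prod.snd = b.map Prod.snd := by
  induction h with
  | nil => rfl
  | cons hpq _ ih =>
    simp only [List.map_cons, ih, List.cons.injEq]
    exact ⟨hpq.1, trivial⟩

def pvRelNC (p q : Int × Char) : Prop :=
  (p.2 = 'L' → q.1 ≤ p.1) ∧ (p.2 = 'R' → p.1 ≤ q.1) ∧ (p.2 ≠ 'L' → p.2 ≠ 'R' → p.1 = q.1)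

theorem pvRelNC_bool (p q : Int × Char) :
    ((if p.2 = 'L' then decide (q.1 ≤ p.1)
      else if p.2 = 'R' then decide (p.1 ≤ q.1)
      else decide (p.1 = q.1)) = true) ↔ pvRelNC p q := by
  unfold pvRelNC
  by_cases h2 : p.2 = 'L'
  · rw [if_pos h2]
    simp only [decide_eq_true_eq]
    constructor
    · intro h
      exact ⟨fun _ => h, fun hh => absurd hh (by rw [h2]; decide), fun hh _ => absurd h2 hh⟩
    · rintro ⟨hL, -, -⟩
      exact hL h2
  · rw [if_neg h2]
    by_cases h3 : p.2 = 'R'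
    · rw [if_pos h3]
      simp only [decide_eq_true_eq]
      constructor
      · intro h
        exact ⟨fun hh => absurd hh h2, fun _ => h, fun _ hh => absurd h3 hh⟩
      · rintro ⟨-, hR, -⟩
        exact hR h3
    · rw [if_neg h3]
      simp only [decide_eq_true_eq]
      constructor
      · intro h
        exact ⟨fun hh => absurd hh h2, fun hh => absurd hh h3, fun _ _ => h⟩
      · rintro ⟨-, -, hO⟩
        exact hO h2 h3

theorem pvForall₂_NC_iff (a : List (Int × Char)) : ∀ b : List (Int × Char),
    a.map Prod.snd = b.map Prod.snd →
    (List.Forall₂ pvRelNC a b ↔ List.Forall₂ pvRel a b) := by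
  induction a with
  | nil =>
    intro b hb
    cases b with
    | nil => simp
    | cons q bt => simp at hb
  | cons p at_ ih =>
    intro b hb
    cases b with
    | nil => simp at hb
    | cons q bt =>
      simp only [List.map_cons, List.cons.injEq] at hb
      constructor
      · intro h
        cases h with
        | cons hpq htail =>
          exact List.Forall₂.cons ⟨hb.1, hpq.1, hpq.2.1, hpq.2.2⟩ ((ih bt hb.2).mp htail)
      · intro h
        cases h with
        | cons hpq htail =>
          exact List.Forall₂.cons ⟨hpq.2.1, hpq.2.2.1, hpq.2.2.2⟩ ((ih bt hb.2).mpr htail)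

theorem pvAlt_iff (start end_ : String) :
    canTransform_alt start end_ = true ↔ pvCond start.toList end_.toList := by
  unfold canTransform_alt
  simp only [pvKey_eq_filter_enum, String.length_toList]
  have htl1 : start.toList.length = start.length := String.length_toList
  have htl2 : end_.toList.length = end_.length := String.length_toList
  by_cases hlen : start.toList.length = end_.toList.length
  · rw [if_neg (by omega)]
    by_cases hrep : PySem.Str.replace start "X" "" = PySem.Str.replace end_ "X" ""
    · rw [if_neg (by simp [hrep])]
      have hfil := (pvFilter_iff start end_).mp hrep
      have hsnd : (pvKey 0 start.toList).map Prod.snd = (pvKey 0 end_.toList).map Prod.snd := by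
        rw [pvKey_map_snd, pvKey_map_snd, hfil]
      have hklen : (pvKey 0 start.toList).length = (pvKey 0 end_.toList).length := by
        have := congrArg List.length hsnd
        simpa using this
      rw [List.all_eq_true]
      unfold pvCond
      constructor
      · intro h
        refine ⟨hlen, ?_⟩
        refine (pvForall₂_NC_iff _ _ hsnd).mp ?_
        rw [List.forall₂_iff_zip]
        refine ⟨hklen, ?_⟩
        intro a b hab
        exact (pvRelNC_bool a b).mp (h (a, b) hab)
      · rintro ⟨-, h2⟩
        intro pq hpq
        have h3 := (pvForall₂_NC_iff _ _ hsnd).mpr h2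
        rw [List.forall₂_iff_zip] at h3
        exact (pvRelNC_bool pq.1 pq.2).mpr (h3.2 (by simpa using hpq))
    · rw [if_pos (by simp [hrep])]
      simp only [Bool.false_eq_true, false_iff]
      rintro ⟨-, h2⟩
      exact hrep ((pvFilter_iff start end_).mpr (by
        rw [← pvKey_map_snd _ 0, ← pvKey_map_snd _ 0]
        exact pvForall₂_snd h2))
  · rw [if_pos (by omega)]
    simp only [Bool.false_eq_true, false_iff]
    rintro ⟨h1, -⟩
    exact hlen h1

theorem canTransform_eq_alt (start end_ : String) : canTransform start end_ = canTransform_alt start end_ := by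
  rw [Bool.eq_iff_iff, pvCanTransform_iff, pvAlt_iff]
  exact ⟨pvCond_of_reach, pvReach_of_cond⟩

-- ===== VERDICT (by name: the statement is the Claim_ definition above) =====
theorem canTransform_spec : Claim_equal_canTransform := by
  intro start end_ _
  unfold Spec_canTransform
  exact canTransform_eq_alt start end_
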